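-- pv_equiv track=rewrite | github.com/qwas15788hj/Baekjoon | 백준/Silver/17829. 222－풀링/222－풀링.py | pooling
-- ===== SOURCE A (Python) =====
-- def pooling(arr2):
--     result = []
--     k = len(arr2)
--     for i in range(0, k, 2):
--         row = []
--         for j in range(0, k, 2):
--             check = [arr2[i][j], arr2[i][j+1], arr2[i+1][j], arr2[i+1][j+1]]
--             check.sort()
--             row.append(check[2])
--         result.append(row)
--
--     return result
-- ===== SOURCE B (Python) =====
-- def pooling(arr2):
--     k = len(arr2)
--     res = []
--     for r1, r2 in zip(arr2[0::2], arr2[1::2]):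
--         row = []
--         for j in range(1, k, 2):
--             a, b = r1[j-1], r1[j]
--             h1, l1 = (a, b) if a >= b else (b, a)
--             c, d = r2[j-1], r2[j]
--             h2, l2 = (c, d) if c >= d else (d, c)
--             row.append(max(h2, l1) if h1 >= h2 else max(h1, l2))
--         res.append(row)
--     return res
-- ===== Notes on version B (the rewrite author's own statement) =====
-- stated objective: alternative
-- what changed: A walks block indices with two nested step-2 range loops, collects the 4 cells of each block into a list, sorts it and takes index 2; B pairs the rows by zipping the stride-2 slices arr2[0::2]/arr2[1::2] and computes each block's second-largest with a comparison tournament (pair maxima/minima, then one comparison) instead of sorting.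
import Mathlib
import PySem

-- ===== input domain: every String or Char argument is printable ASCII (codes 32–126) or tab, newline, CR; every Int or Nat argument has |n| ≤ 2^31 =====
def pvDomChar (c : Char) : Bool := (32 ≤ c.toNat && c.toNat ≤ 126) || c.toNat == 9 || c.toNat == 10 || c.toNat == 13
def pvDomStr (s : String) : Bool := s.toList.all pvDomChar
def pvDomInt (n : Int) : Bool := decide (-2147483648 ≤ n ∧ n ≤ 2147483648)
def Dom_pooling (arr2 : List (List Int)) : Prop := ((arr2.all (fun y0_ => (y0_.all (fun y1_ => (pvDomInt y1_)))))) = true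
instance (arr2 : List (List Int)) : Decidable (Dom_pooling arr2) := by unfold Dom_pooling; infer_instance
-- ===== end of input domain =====

-- B replaces A's "collect 4 cells by index, sort, take [2]" block loop by a zip/stride-slice
-- pipeline over row pairs with a comparison tournament for the second-largest (objective: alternative).

-- ===== PORT A =====
def pooling (arr2 : List (List Int)) : List (List Int) :=
  let k : Int := (arr2.length : Int)
  (PySem.List.pyRange 0 k 2).foldl (fun result i =>
    result ++ [(PySem.List.pyRange 0 k 2).foldl (fun row j =>
      let check : List Int :=
        [PySem.List.pyGetD (PySem.List.pyGetD arr2 i []) j 0,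
         PySem.List.pyGetD (PySem.List.pyGetD arr2 i []) (j+1) 0,
         PySem.List.pyGetD (PySem.List.pyGetD arr2 (i+1) []) j 0,
         PySem.List.pyGetD (PySem.List.pyGetD arr2 (i+1) []) (j+1) 0]
      let chk := PySem.List.sorted check (fun x => x)
      row ++ [PySem.List.pyGetD chk 2 0]) []]) []

-- ===== PORT B =====
-- second largest of {a,b,c,d} by a comparison tournament, as in Source B's loop body
def pvTop2 (a b c d : Int) : Int :=
  let p1 := if a ≥ b then (a, b) else (b, a)
  let p2 := if c ≥ d then (c, d) else (d, c)
  if p1.1 ≥ p2.1 then max p2.1 p1.2 else max p1.1 p2.2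

def pooling_alt (arr2 : List (List Int)) : List (List Int) :=
  let k : Int := (arr2.length : Int)
  let evens := (PySem.List.slice? arr2 (some 0) none 2).getD []
  let odds := (PySem.List.slice? arr2 (some 1) none 2).getD []
  (evens.zip odds).foldl (fun res rr =>
    res ++ [(PySem.List.pyRange 1 k 2).foldl (fun row j =>
      row ++ [pvTop2 (PySem.List.pyGetD rr.1 (j-1) 0) (PySem.List.pyGetD rr.1 j 0)
                     (PySem.List.pyGetD rr.2 (j-1) 0) (PySem.List.pyGetD rr.2 j 0)]) []]) []

-- ===== PRECONDITION & SPEC =====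
-- Pre_ excludes exactly the inputs where A raises IndexError: an odd number of rows, or a row
-- shorter than the number of rows (A indexes every row at columns 0..len(arr2)-1).
def Pre_pooling (arr2 : List (List Int)) : Prop :=
  arr2.length % 2 = 0 ∧ ∀ r ∈ arr2, arr2.length ≤ r.length
instance (arr2 : List (List Int)) : Decidable (Pre_pooling arr2) := by unfold Pre_pooling; infer_instance

def pvWitness_pooling : List (List Int) := [[1, 2, 5, 5], [3, 4, 3, 1], [0, 0, 7, 6], [9, 8, 7, 6]]

def Spec_pooling (arr2 : List (List Int)) (out : List (List Int)) : Prop := out = pooling_alt arr2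
instance (arr2 : List (List Int)) (out : List (List Int)) : Decidable (Spec_pooling arr2 out) := by unfold Spec_pooling; infer_instance

-- ===== CLAIM (what is proved, stated in full; the proofs are below) =====
def Claim_equal_pooling : Prop := ∀ (arr2 : List (List Int)), Dom_pooling arr2 → Pre_pooling arr2 → Spec_pooling arr2 (pooling arr2)

-- ===== LEMMAS AND PROOFS =====

-- the cell both reshaped programs read, in Nat-index form
def pvCell (arr2 : List (List Int)) (i j : Nat) : Int := (arr2.getD i []).getD j 0

-- range(0, K, 2) for even K is [2*t for t in range(K/2)]
theorem pvRange2 (K : Nat) (hK : K % 2 = 0) :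
    PySem.List.pyRange 0 (K : Int) 2 = (List.range (K / 2)).map (fun t : Nat => 2 * (t : Int)) := by
  rw [PySem.List.pyRange_of_pos 0 (K : Int) (by norm_num)]
  have hc : (if (0:Int) < (K:Int) then (((K:Int) - 0 + 2 - 1) / 2).toNat else 0) = K / 2 := by
    by_cases h : 0 < K
    · rw [if_pos (by exact_mod_cast h)]
      have h2 : (K:Int) - 0 + 2 - 1 = ((K + 1 : Nat) : Int) := by omega
      rw [h2, show ((K + 1 : Nat) : Int) / 2 = (((K + 1) / 2 : Nat) : Int) from
        (Int.natCast_div (K + 1) 2).symm, Int.toNat_natCast]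
      omega
    · rw [if_neg (by omega)]; omega
  rw [hc]
  exact List.map_congr_left (fun t _ => by ring)

-- range(1, K, 2) for even K is [2*t+1 for t in range(K/2)]
theorem pvRange2odd (K : Nat) (hK : K % 2 = 0) :
    PySem.List.pyRange 1 (K : Int) 2 = (List.range (K / 2)).map (fun t : Nat => 2 * (t : Int) + 1) := by
  rw [PySem.List.pyRange_of_pos 1 (K : Int) (by norm_num)]
  have hc : (if (1:Int) < (K:Int) then (((K:Int) - 1 + 2 - 1) / 2).toNat else 0) = K / 2 := by
    by_cases h : 1 < K
    · rw [if_pos (by exact_mod_cast h)]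
      have h2 : (K:Int) - 1 + 2 - 1 = ((K : Nat) : Int) := by omega
      rw [h2, show ((K : Nat) : Int) / 2 = ((K / 2 : Nat) : Int) from
        (Int.natCast_div K 2).symm, Int.toNat_natCast]
    · rw [if_neg (by omega)]; omega
  rw [hc]
  exact List.map_congr_left (fun t _ => by ring)

-- xs[s::2] is xs[s:len(xs):2]
theorem pvSlice2_none {α : Type} (xs : List α) (d : α) (s : Nat) (hs : s ≤ xs.length) :
    PySem.List.slice? xs (some (s:Int)) none 2 =
      some ((List.range ((xs.length - s + 1)/2)).map (fun t => xs.getD (s + 2*t) d)) := by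
  have hstep0 : ¬((2:Int) = 0) := by norm_num
  have hstepneg : ¬((2:Int) < 0) := by norm_num
  have hsneg : ¬((s:Int) < 0) := by omega
  have hmins : min (s:Int) (xs.length:Int) = (s:Int) := by omega
  simp only [PySem.List.slice?, PySem.List.sliceIndices, hstep0, hstepneg, hsneg,
    (show ((0:Int) < 2) from by norm_num), if_true, if_false, hmins, Option.some.injEq]
  rcases Nat.lt_or_ge s xs.length with hse | hse
  · rw [if_pos (by exact_mod_cast hse)]
    have hcnt : (((xs.length:Int) - s + 2 - 1)/2).toNat = (xs.length - s + 1)/2 := by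
      have h2 : (xs.length:Int) - s + 2 - 1 = ((xs.length - s + 1 : Nat) : Int) := by omega
      rw [h2, show ((xs.length - s + 1 : Nat) : Int) / 2 = (((xs.length - s + 1)/2 : Nat) : Int) from
        (Int.natCast_div (xs.length - s + 1) 2).symm]
      exact Int.toNat_natCast _
    rw [hcnt]
    apply List.filterMap_eq_map_iff_forall_eq_some.mpr
    intro t ht
    have ht' : t < (xs.length - s + 1)/2 := List.mem_range.mp ht
    have hidxlen : s + 2*t < xs.length := by omega
    have hcast : ((s:Int) + 2 * (t:Int)).toNat = s + 2*t := by omega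
    rw [hcast, List.getElem?_eq_getElem hidxlen, List.getD_eq_getElem xs d hidxlen]
  · rw [if_neg (by omega)]
    have h0 : (xs.length - s + 1)/2 = 0 := by omega
    simp [h0]

-- the 3rd element of the sorted 4-list is B's tournament second-largest
set_option maxHeartbeats 2000000 in
theorem pvSecond4 (a b c d : Int) :
    PySem.List.pyGetD (PySem.List.sorted [a,b,c,d] (fun x => x)) 2 0 = pvTop2 a b c d := by
  simp only [PySem.List.sorted_eq_foldl_insertBy, List.foldl]
  unfold pvTop2
  repeat' (first
    | split_ifs
    | simp only [PySem.List.insertBy, decide_eq_true_eq, max_def])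
  all_goals simp_all [PySem.List.pyGetD, PySem.List.pyGet?, PySem.List.pyIdx?]
  all_goals omega

-- A reshaped: a map over block coordinates
theorem pooling_eq (arr2 : List (List Int)) (hK : arr2.length % 2 = 0) :
    pooling arr2 = (List.range (arr2.length / 2)).map (fun s => (List.range (arr2.length / 2)).map (fun t =>
      PySem.List.pyGetD (PySem.List.sorted
        [pvCell arr2 (2*s) (2*t), pvCell arr2 (2*s) (2*t+1),
         pvCell arr2 (2*s+1) (2*t), pvCell arr2 (2*s+1) (2*t+1)] (fun x => x)) 2 0)) := by
  unfold pooling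
  dsimp only
  rw [pvRange2 arr2.length hK, List.foldl_map, PySem.List.foldl_append_singleton_eq_map, List.nil_append]
  apply List.map_congr_left
  intro s _
  rw [List.foldl_map, PySem.List.foldl_append_singleton_eq_map, List.nil_append]
  apply List.map_congr_left
  intro t _
  have c1 : (2 * (s:Int)) = ((2*s : Nat) : Int) := by push_cast; ring
  have c2 : ((2*s : Nat) : Int) + 1 = ((2*s+1 : Nat) : Int) := by push_cast; ring
  have c3 : (2 * (t:Int)) = ((2*t : Nat) : Int) := by push_cast; ring
  have c4 : ((2*t : Nat) : Int) + 1 = ((2*t+1 : Nat) : Int) := by push_cast; ring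
  simp only [c1, c2, c3, c4, PySem.List.pyGetD_natCast, pvCell]

-- B reshaped: the same map over block coordinates, with the tournament entry
theorem pooling_alt_eq (arr2 : List (List Int)) (hK : arr2.length % 2 = 0) :
    pooling_alt arr2 = (List.range (arr2.length / 2)).map (fun s => (List.range (arr2.length / 2)).map (fun t =>
      pvTop2 (pvCell arr2 (2*s) (2*t)) (pvCell arr2 (2*s) (2*t+1))
             (pvCell arr2 (2*s+1) (2*t)) (pvCell arr2 (2*s+1) (2*t+1)))) := by
  rcases Nat.eq_zero_or_pos arr2.length with h0 | hpos
  · have : arr2 = [] := List.length_eq_zero_iff.mp h0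
    subst this
    decide
  · have h2 : 2 ≤ arr2.length := by omega
    unfold pooling_alt
    dsimp only
    rw [show (some (0:Int)) = some (((0:Nat):Int)) from by norm_num,
        show (some (1:Int)) = some (((1:Nat):Int)) from by norm_num]
    rw [pvSlice2_none arr2 [] 0 (by omega), pvSlice2_none arr2 [] 1 (by omega)]
    simp only [Option.getD_some]
    have hc0 : (arr2.length - 0 + 1)/2 = arr2.length / 2 := by omega
    have hc1 : (arr2.length - 1 + 1)/2 = arr2.length / 2 := by omega
    rw [hc0, hc1, List.zip_map', List.foldl_map, PySem.List.foldl_append_singleton_eq_map,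
        List.nil_append]
    apply List.map_congr_left
    intro s _
    rw [pvRange2odd arr2.length hK, List.foldl_map, PySem.List.foldl_append_singleton_eq_map,
        List.nil_append]
    apply List.map_congr_left
    intro t _
    have c2 : (2 * (t:Int) + 1) = ((2*t+1 : Nat) : Int) := by push_cast; ring
    have c3 : ((2*t+1 : Nat) : Int) - 1 = ((2*t : Nat) : Int) := by push_cast; ring
    simp only [c2, c3, PySem.List.pyGetD_natCast, pvCell, Nat.zero_add, Nat.add_comm 1 (2*s)]

-- ===== VERDICT (by name: the statement is the Claim_ definition above) =====
theorem pooling_spec : Claim_equal_pooling := by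
  intro arr2 _ hpre
  obtain ⟨hK, -⟩ := hpre
  unfold Spec_pooling
  rw [pooling_eq arr2 hK, pooling_alt_eq arr2 hK]
  apply List.map_congr_left
  intro s _
  apply List.map_congr_left
  intro t _
  exact pvSecond4 _ _ _ _
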